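-- pv_equiv track=rewrite | github.com/henryZe/code | leetcode/daily/2312_sellingWood.py | sellingWood
-- ===== SOURCE A (Python) =====
-- from typing import List
--
-- def sellingWood(m: int, n: int, prices: List[List[int]]) -> int:
--     price_h = {}
--     for h, w, p in prices:
--         price_h[(h, w)] = p
--
--     dp = []
--     for _ in range(m + 1):
--         dp.append([0] * (n + 1))
--
--     for i in range(1 + m):
--         for j in range(1 + n):
--             dp[i][j] = max(price_h.get((i, j), 0),
--                             max((dp[i][k] + dp[i][j - k] for k in range(1, j)), default = 0),
--                             max((dp[k][j] + dp[i - k][j] for k in range(1, i)), default = 0))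
--     return dp[m][n]
-- ===== SOURCE B (Python) =====
-- from typing import List
--
-- def sellingWood(m: int, n: int, prices: List[List[int]]) -> int:
--     price = {}
--     for h, w, p in prices:
--         price[(h, w)] = p
--
--     memo = {}
--
--     def solve(i: int, j: int) -> int:
--         hit = memo.get((i, j))
--         if hit is not None:
--             return hit
--         best = max(0, price.get((i, j), 0))  # selling nothing is always an option
--         for k in range(1, j):
--             v = solve(i, k) + solve(i, j - k)
--             if best < v:
--                 best = v
--         for k in range(1, i):
--             v = solve(k, j) + solve(i - k, j)
--             if best < v:
--                 best = v
--         memo[(i, j)] = best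
--         return best
--
--     return solve(m, n)
-- ===== Notes on version B (the rewrite author's own statement) =====
-- stated objective: alternative
-- what changed: Replaced A's bottom-up (m+1)x(n+1) table filled by nested index loops with a top-down memoized recursion solve(i,j) over a dict keyed by (i,j), computing each cell on demand.
import Mathlib
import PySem

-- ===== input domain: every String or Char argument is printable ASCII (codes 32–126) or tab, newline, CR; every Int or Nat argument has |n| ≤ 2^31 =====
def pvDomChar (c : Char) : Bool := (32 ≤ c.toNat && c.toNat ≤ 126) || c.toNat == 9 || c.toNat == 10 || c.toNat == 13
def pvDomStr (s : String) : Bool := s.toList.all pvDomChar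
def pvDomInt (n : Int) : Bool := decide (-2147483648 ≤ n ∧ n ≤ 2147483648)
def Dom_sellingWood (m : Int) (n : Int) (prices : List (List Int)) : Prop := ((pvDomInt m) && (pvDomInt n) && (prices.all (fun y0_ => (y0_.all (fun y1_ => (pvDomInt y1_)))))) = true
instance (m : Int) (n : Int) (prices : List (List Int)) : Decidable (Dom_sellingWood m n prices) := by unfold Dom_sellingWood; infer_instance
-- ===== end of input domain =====

-- B replaces A's bottom-up DP table with a top-down memoized recursion over a dict; same asymptotic cost (objective: alternative).


-- ===== PORT A =====
-- 'for h, w, p in prices: price_h[(h, w)] = p' (exact under Pre_: every row has length 3; other rows raise ValueError)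
def pvBuildPrice (prices : List (List Int)) : PySem.Dict (Int × Int) Int :=
  prices.foldl (fun d row =>
    match row with
    | [h, w, p] => d.insert (h, w) p
    | _ => d) PySem.Dict.empty

-- max(gen, default=0)
def pvMaxD (xs : List Int) : Int := (PySem.List.max? xs (fun x => x)).getD 0

-- dp[i][j] read / write (exact where the Python indices are in range, which Pre_ guarantees)
def pvGet2 (dp : List (List Int)) (i j : Int) : Int :=
  PySem.List.pyGetD (PySem.List.pyGetD dp i []) j 0

def pvSet2 (dp : List (List Int)) (i j : Int) (v : Int) : List (List Int) :=
  PySem.List.pySetD dp i (PySem.List.pySetD (PySem.List.pyGetD dp i []) j v)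

-- max(price_h.get((i,j),0), max(gen1, default=0), max(gen2, default=0))
def pvCell (price : PySem.Dict (Int × Int) Int) (dp : List (List Int)) (i j : Int) : Int :=
  max (max (price.getD (i, j) 0)
      (pvMaxD ((PySem.List.pyRange 1 j 1).map (fun k => pvGet2 dp i k + pvGet2 dp i (j - k)))))
    (pvMaxD ((PySem.List.pyRange 1 i 1).map (fun k => pvGet2 dp k j + pvGet2 dp (i - k) j)))

def sellingWood (m : Int) (n : Int) (prices : List (List Int)) : Int :=
  let price := pvBuildPrice prices
  let dp : List (List Int) :=
    (PySem.List.pyRange 0 (m + 1) 1).foldl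
      (fun dp _ => dp ++ [PySem.List.pyRepeat [(0 : Int)] (n + 1)]) []
  let dp :=
    (PySem.List.pyRange 0 (1 + m) 1).foldl (fun dp i =>
      (PySem.List.pyRange 0 (1 + n) 1).foldl (fun dp j =>
        pvSet2 dp i j (pvCell price dp i j)) dp) dp
  pvGet2 dp m n

-- ===== PORT B =====
-- top-down memoized recursion: solve(i, j) threading the memo dict; the Nat fuel argument is a
-- totality guard only (each recursive call strictly decreases i+j, so fuel m+n+1 is never exhausted);
-- the two 'for k in range(1, _)' loops are folds over pyRange carrying (best, memo)
def pvSolve (fuel : Nat) (price : PySem.Dict (Int × Int) Int) (i j : Int)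
    (memo : PySem.Dict (Int × Int) Int) : Int × PySem.Dict (Int × Int) Int :=
  match fuel with
  | 0 => (0, memo)  -- unreachable for fuel > i.toNat + j.toNat
  | fuel + 1 =>
    match memo.get? (i, j) with
    | some v => (v, memo)
    | none =>
      let best := max 0 (price.getD (i, j) 0)
      let r1 := (PySem.List.pyRange 1 j 1).foldl (fun (s : Int × PySem.Dict (Int × Int) Int) k =>
        let a := pvSolve fuel price i k s.2
        let b := pvSolve fuel price i (j - k) a.2
        let v := a.1 + b.1
        (if s.1 < v then v else s.1, b.2)) (best, memo)
      let r2 := (PySem.List.pyRange 1 i 1).foldl (fun (s : Int × PySem.Dict (Int × Int) Int) k =>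
        let a := pvSolve fuel price k j s.2
        let b := pvSolve fuel price (i - k) j a.2
        let v := a.1 + b.1
        (if s.1 < v then v else s.1, b.2)) r1
      (r2.1, r2.2.insert (i, j) r2.1)

def sellingWood_alt (m : Int) (n : Int) (prices : List (List Int)) : Int :=
  (pvSolve (m.toNat + n.toNat + 1) (pvBuildPrice prices) m n PySem.Dict.empty).1

-- ===== PRECONDITION & SPEC =====
-- Pre_ excludes exactly the inputs where A raises: a negative dimension (IndexError at dp[m][n])
-- or a price row that is not a 3-element list (ValueError on unpacking).
def Pre_sellingWood (m : Int) (n : Int) (prices : List (List Int)) : Prop :=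
  0 ≤ m ∧ 0 ≤ n ∧ ∀ row ∈ prices, row.length = 3
instance (m : Int) (n : Int) (prices : List (List Int)) : Decidable (Pre_sellingWood m n prices) := by
  unfold Pre_sellingWood; infer_instance

def pvWitness_sellingWood : Int × Int × List (List Int) := (3, 5, [[1, 4, 2], [2, 2, 7], [2, 1, 3]])

def Spec_sellingWood (m : Int) (n : Int) (prices : List (List Int)) (out : Int) : Prop :=
  out = sellingWood_alt m n prices
instance (m : Int) (n : Int) (prices : List (List Int)) (out : Int) : Decidable (Spec_sellingWood m n prices out) := by
  unfold Spec_sellingWood; infer_instance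

-- ===== CLAIM (what is proved, stated in full; the proofs are below) =====
def Claim_equal_sellingWood : Prop := ∀ (m : Int) (n : Int) (prices : List (List Int)), Dom_sellingWood m n prices → Pre_sellingWood m n prices → Spec_sellingWood m n prices (sellingWood m n prices)

-- ===== LEMMAS AND PROOFS =====

-- the common mathematical value both programs compute: the best obtainable price for an i×j piece
def fSpec (price : PySem.Dict (Int × Int) Int) (i j : Int) : Int :=
  List.foldl max (max 0 (price.getD (i, j) 0))
    (((PySem.List.pyRange 1 j 1).attach.map
        (fun k => fSpec price i k.1 + fSpec price i (j - k.1))) ++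
     ((PySem.List.pyRange 1 i 1).attach.map
        (fun k => fSpec price k.1 j + fSpec price (i - k.1) j)))
termination_by (i.toNat + j.toNat)
decreasing_by
  · have := (PySem.List.mem_pyRange_one.mp k.2); omega
  · have := (PySem.List.mem_pyRange_one.mp k.2); omega
  · have := (PySem.List.mem_pyRange_one.mp k.2); omega
  · have := (PySem.List.mem_pyRange_one.mp k.2); omega

lemma fSpec_eq (price : PySem.Dict (Int × Int) Int) (i j : Int) :
    fSpec price i j =
    List.foldl max (max 0 (price.getD (i, j) 0))
      (((PySem.List.pyRange 1 j 1).map (fun k => fSpec price i k + fSpec price i (j - k))) ++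
       ((PySem.List.pyRange 1 i 1).map (fun k => fSpec price k j + fSpec price (i - k) j))) := by
  rw [fSpec,
    List.attach_map_val (l := PySem.List.pyRange 1 j 1)
      (f := fun k => fSpec price i k + fSpec price i (j - k)),
    List.attach_map_val (l := PySem.List.pyRange 1 i 1)
      (f := fun k => fSpec price k j + fSpec price (i - k) j)]

lemma fSpec_nonneg (price : PySem.Dict (Int × Int) Int) (i j : Int) : 0 ≤ fSpec price i j := by
  rw [fSpec_eq]
  have h := (PySem.List.le_foldl_max
    (((PySem.List.pyRange 1 j 1).map (fun k => fSpec price i k + fSpec price i (j - k))) ++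
     ((PySem.List.pyRange 1 i 1).map (fun k => fSpec price k j + fSpec price (i - k) j)))
    (max 0 (price.getD (i, j) 0))).1
  omega

-- ---------- B side: the memo dict only ever holds correct values ----------

def MemoOK (price : PySem.Dict (Int × Int) Int) (memo : PySem.Dict (Int × Int) Int) : Prop :=
  ∀ p v, memo.get? p = some v → v = fSpec price p.1 p.2

lemma memoOK_empty (price : PySem.Dict (Int × Int) Int) : MemoOK price PySem.Dict.empty := by
  intro p v h
  simp [PySem.Dict.get?_empty] at h

lemma memoOK_insert (price memo : PySem.Dict (Int × Int) Int) (i j v : Int)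
    (h : MemoOK price memo) (hv : v = fSpec price i j) :
    MemoOK price (memo.insert (i, j) v) := by
  intro p w hw
  rw [PySem.Dict.get?_insert] at hw
  split at hw
  · rename_i hp; cases hw; subst hp; exact hv
  · exact h p w hw

lemma max_ite (a b : Int) : (if a < b then b else a) = max a b := by
  split <;> omega

lemma loopW_ok (price : PySem.Dict (Int × Int) Int) (fuel : Nat) (i j : Int)
    (IH : ∀ i' j' memo', i'.toNat + j'.toNat < fuel → MemoOK price memo' →
      (pvSolve fuel price i' j' memo').1 = fSpec price i' j' ∧
      MemoOK price (pvSolve fuel price i' j' memo').2)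
    (hsum : i.toNat + j.toNat ≤ fuel) :
    ∀ K (k : Int) (s : Int × PySem.Dict (Int × Int) Int), (j - k).toNat ≤ K → 1 ≤ k →
      MemoOK price s.2 →
      ((PySem.List.pyRange k j 1).foldl (fun (s : Int × PySem.Dict (Int × Int) Int) k =>
        let a := pvSolve fuel price i k s.2
        let b := pvSolve fuel price i (j - k) a.2
        let v := a.1 + b.1
        (if s.1 < v then v else s.1, b.2)) s).1 =
        List.foldl max s.1 ((PySem.List.pyRange k j 1).map
          (fun k' => fSpec price i k' + fSpec price i (j - k'))) ∧
      MemoOK price ((PySem.List.pyRange k j 1).foldl (fun (s : Int × PySem.Dict (Int × Int) Int) k =>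
        let a := pvSolve fuel price i k s.2
        let b := pvSolve fuel price i (j - k) a.2
        let v := a.1 + b.1
        (if s.1 < v then v else s.1, b.2)) s).2 := by
  intro K
  induction K with
  | zero =>
    intro k s hK hk hm
    rw [PySem.List.pyRange_one_eq_nil (show j ≤ k by omega)]
    exact ⟨rfl, hm⟩
  | succ K ih =>
    intro k s hK hk hm
    by_cases hkj : k < j
    · rw [PySem.List.pyRange_one_cons hkj, List.foldl_cons, List.map_cons, List.foldl_cons]
      have h1 := IH i k s.2 (by omega) hm
      have h2 := IH i (j - k) (pvSolve fuel price i k s.2).2 (by omega) h1.2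
      dsimp only
      rw [max_ite, h1.1, h2.1]
      exact ih (k + 1) _ (by omega) (by omega) h2.2
    · rw [PySem.List.pyRange_one_eq_nil (show j ≤ k by omega)]
      exact ⟨rfl, hm⟩

lemma loopH_ok (price : PySem.Dict (Int × Int) Int) (fuel : Nat) (i j : Int)
    (IH : ∀ i' j' memo', i'.toNat + j'.toNat < fuel → MemoOK price memo' →
      (pvSolve fuel price i' j' memo').1 = fSpec price i' j' ∧
      MemoOK price (pvSolve fuel price i' j' memo').2)
    (hsum : i.toNat + j.toNat ≤ fuel) :
    ∀ K (k : Int) (s : Int × PySem.Dict (Int × Int) Int), (i - k).toNat ≤ K → 1 ≤ k →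
      MemoOK price s.2 →
      ((PySem.List.pyRange k i 1).foldl (fun (s : Int × PySem.Dict (Int × Int) Int) k =>
        let a := pvSolve fuel price k j s.2
        let b := pvSolve fuel price (i - k) j a.2
        let v := a.1 + b.1
        (if s.1 < v then v else s.1, b.2)) s).1 =
        List.foldl max s.1 ((PySem.List.pyRange k i 1).map
          (fun k' => fSpec price k' j + fSpec price (i - k') j)) ∧
      MemoOK price ((PySem.List.pyRange k i 1).foldl (fun (s : Int × PySem.Dict (Int × Int) Int) k =>
        let a := pvSolve fuel price k j s.2
        let b := pvSolve fuel price (i - k) j a.2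
        let v := a.1 + b.1
        (if s.1 < v then v else s.1, b.2)) s).2 := by
  intro K
  induction K with
  | zero =>
    intro k s hK hk hm
    rw [PySem.List.pyRange_one_eq_nil (show i ≤ k by omega)]
    exact ⟨rfl, hm⟩
  | succ K ih =>
    intro k s hK hk hm
    by_cases hki : k < i
    · rw [PySem.List.pyRange_one_cons hki, List.foldl_cons, List.map_cons, List.foldl_cons]
      have h1 := IH k j s.2 (by omega) hm
      have h2 := IH (i - k) j (pvSolve fuel price k j s.2).2 (by omega) h1.2
      dsimp only
      rw [max_ite, h1.1, h2.1]
      exact ih (k + 1) _ (by omega) (by omega) h2.2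
    · rw [PySem.List.pyRange_one_eq_nil (show i ≤ k by omega)]
      exact ⟨rfl, hm⟩

lemma solve_ok (price : PySem.Dict (Int × Int) Int) :
    ∀ (fuel : Nat) (i j : Int) (memo : PySem.Dict (Int × Int) Int),
      i.toNat + j.toNat < fuel → MemoOK price memo →
      (pvSolve fuel price i j memo).1 = fSpec price i j ∧
      MemoOK price (pvSolve fuel price i j memo).2 := by
  intro fuel
  induction fuel with
  | zero => intro i j memo h hm; omega
  | succ fuel ih =>
    intro i j memo h hm
    rw [pvSolve]
    cases hg : memo.get? (i, j) with
    | some v => exact ⟨hm (i, j) v hg, hm⟩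
    | none =>
      obtain ⟨hW1, hW2⟩ := loopW_ok price fuel i j ih (by omega) (j - 1).toNat 1
        (max 0 (price.getD (i, j) 0), memo) (by omega) le_rfl hm
      obtain ⟨hH1, hH2⟩ := loopH_ok price fuel i j ih (by omega) (i - 1).toNat 1
        ((PySem.List.pyRange 1 j 1).foldl (fun (s : Int × PySem.Dict (Int × Int) Int) k =>
          let a := pvSolve fuel price i k s.2
          let b := pvSolve fuel price i (j - k) a.2
          let v := a.1 + b.1
          (if s.1 < v then v else s.1, b.2)) (max 0 (price.getD (i, j) 0), memo))
        (by omega) le_rfl hW2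
      refine ⟨?_, ?_⟩ <;> dsimp only
      · rw [hH1, hW1, fSpec_eq, List.foldl_append]
      · exact memoOK_insert price _ i j _ hH2
          (by rw [hH1, hW1, fSpec_eq, List.foldl_append])

lemma alt_eq (m n : Int) (prices : List (List Int)) :
    sellingWood_alt m n prices = fSpec (pvBuildPrice prices) m n := by
  exact (solve_ok (pvBuildPrice prices) (m.toNat + n.toNat + 1) m n PySem.Dict.empty
    (by omega) (memoOK_empty _)).1

-- ---------- A side ----------

lemma pvMaxD_eq_foldl (xs : List Int) (h : ∀ x ∈ xs, 0 ≤ x) :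
    pvMaxD xs = xs.foldl max 0 := by
  cases xs with
  | nil => rfl
  | cons x t =>
    rw [pvMaxD, PySem.List.max?_id_cons]
    have hx : max 0 x = x := by have := h x (by simp); omega
    simp only [Option.getD_some, List.foldl_cons, hx]

lemma cell_shape (p : Int) (s1 s2 : List Int) (h1 : ∀ x ∈ s1, 0 ≤ x) (h2 : ∀ x ∈ s2, 0 ≤ x) :
    max (max p (pvMaxD s1)) (pvMaxD s2) = List.foldl max (max 0 p) (s1 ++ s2) := by
  rw [pvMaxD_eq_foldl s1 h1, pvMaxD_eq_foldl s2 h2, List.foldl_append]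
  have e1 : List.foldl max (max 0 p) s1 = max p (List.foldl max 0 s1) := by
    rw [max_comm 0 p, List.foldl_assoc]
  have h0 : 0 ≤ List.foldl max 0 s1 := (PySem.List.le_foldl_max s1 0).1
  have e2 : max p (List.foldl max 0 s1) = max (max p (List.foldl max 0 s1)) 0 := by omega
  rw [e1, e2, List.foldl_assoc]
  omega

-- total getD view of a set at an index (generic list fact specialised to our grid accesses)
lemma getD_set_if {α : Type} (l : List α) (i n : Nat) (v d : α) :
    (l.set i v).getD n d = if i = n ∧ i < l.length then v else l.getD n d := by
  rw [List.getD_eq_getElem?_getD, List.getElem?_set, List.getD_eq_getElem?_getD]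
  rcases Nat.lt_or_ge n l.length with hn | hn
  · rw [List.getElem?_eq_getElem hn]
    split
    · rename_i h; rw [if_pos (by omega), if_pos (by constructor <;> omega)]; rfl
    · rename_i h; rw [if_neg (by omega)]
  · rw [List.getElem?_eq_none (by omega)]
    split
    · rename_i h; rw [if_neg (by omega), if_neg (by omega)]
    · rename_i h; rw [if_neg (by omega)]

lemma pvGet2_getD (dp : List (List Int)) (a b : Int) (ha : 0 ≤ a) (hb : 0 ≤ b) :
    pvGet2 dp a b = (dp.getD a.toNat []).getD b.toNat 0 := by
  have h1 : PySem.List.pyGetD dp a ([] : List Int) = dp.getD a.toNat [] := by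
    have h := PySem.List.pyGetD_natCast dp a.toNat ([] : List Int)
    rwa [Int.toNat_of_nonneg ha] at h
  have h2 : PySem.List.pyGetD (dp.getD a.toNat []) b (0 : Int) =
      (dp.getD a.toNat []).getD b.toNat 0 := by
    have h := PySem.List.pyGetD_natCast (dp.getD a.toNat []) b.toNat (0 : Int)
    rwa [Int.toNat_of_nonneg hb] at h
  rw [pvGet2, h1, h2]

lemma pvSet2_eq (dp : List (List Int)) (i j v : Int) (hi : 0 ≤ i) (hj : 0 ≤ j) :
    pvSet2 dp i j v = dp.set i.toNat ((dp.getD i.toNat []).set j.toNat v) := by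
  have h1 : PySem.List.pyGetD dp i ([] : List Int) = dp.getD i.toNat [] := by
    have h := PySem.List.pyGetD_natCast dp i.toNat ([] : List Int)
    rwa [Int.toNat_of_nonneg hi] at h
  rw [pvSet2, PySem.List.pySetD_of_nonneg _ _ hi, h1, PySem.List.pySetD_of_nonneg _ _ hj]

lemma pvGet2_set (dp : List (List Int)) (i j v a b : Int)
    (hi : 0 ≤ i) (hi2 : i.toNat < dp.length) (hj : 0 ≤ j)
    (hj2 : j.toNat < (dp.getD i.toNat []).length) (ha : 0 ≤ a) (hb : 0 ≤ b) :
    pvGet2 (pvSet2 dp i j v) a b =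
      if a.toNat = i.toNat ∧ b.toNat = j.toNat then v else pvGet2 dp a b := by
  rw [pvSet2_eq dp i j v hi hj,
    pvGet2_getD (dp.set i.toNat ((dp.getD i.toNat []).set j.toNat v)) a b ha hb,
    pvGet2_getD dp a b ha hb, getD_set_if]
  by_cases hia : i.toNat = a.toNat
  · rw [if_pos ⟨hia, hi2⟩, getD_set_if]
    by_cases hjb : j.toNat = b.toNat
    · rw [if_pos ⟨hjb, hj2⟩, if_pos ⟨hia.symm, hjb.symm⟩]
    · rw [if_neg (by omega), if_neg (by omega), hia]
  · rw [if_neg (by omega), if_neg (by omega)]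

def GridOK (price : PySem.Dict (Int × Int) Int) (m n i j : Int) (dp : List (List Int)) : Prop :=
  dp.length = (m + 1).toNat ∧ (∀ row ∈ dp, row.length = (n + 1).toNat) ∧
  (∀ a b : Int, 0 ≤ a → a ≤ m → 0 ≤ b → b ≤ n → (a < i ∨ (a = i ∧ b < j)) →
    pvGet2 dp a b = fSpec price a b)

lemma inner_ok (price : PySem.Dict (Int × Int) Int) (m n i : Int)
    (hi : 0 ≤ i) (hi2 : i ≤ m) (hn : 0 ≤ n) :
    ∀ K (j : Int) (dp : List (List Int)), ((1 + n) - j).toNat ≤ K → 0 ≤ j →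
      GridOK price m n i j dp →
      GridOK price m n i (1 + n)
        ((PySem.List.pyRange j (1 + n) 1).foldl
          (fun dp j' => pvSet2 dp i j' (pvCell price dp i j')) dp) := by
  intro K
  induction K with
  | zero =>
    intro j dp hK hj hG
    rw [PySem.List.pyRange_one_eq_nil (show 1 + n ≤ j by omega)]
    exact ⟨hG.1, hG.2.1, fun a b ha ha2 hb hb2 hc =>
      hG.2.2 a b ha ha2 hb hb2 (by omega)⟩
  | succ K ih =>
    intro j dp hK hj hG
    by_cases hjn : j < 1 + n
    · rw [PySem.List.pyRange_one_cons hjn, List.foldl_cons]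
      obtain ⟨hlen, hrows, hget⟩ := hG
      have hitn : i.toNat < dp.length := by omega
      have hrowi : dp.getD i.toNat [] = dp[i.toNat] := List.getD_eq_getElem dp [] hitn
      have hrowlen : (dp.getD i.toNat []).length = (n + 1).toNat := by
        rw [hrowi]; exact hrows _ (List.getElem_mem hitn)
      -- the freshly computed cell is the spec value
      have hcell : pvCell price dp i j = fSpec price i j := by
        rw [pvCell, fSpec_eq]
        have e1 : (PySem.List.pyRange 1 j 1).map
            (fun k => pvGet2 dp i k + pvGet2 dp i (j - k)) =
            (PySem.List.pyRange 1 j 1).map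
            (fun k => fSpec price i k + fSpec price i (j - k)) := by
          apply List.map_congr_left
          intro k hk
          have hk' := PySem.List.mem_pyRange_one.mp hk
          rw [hget i k hi hi2 (by omega) (by omega) (by omega),
            hget i (j - k) hi hi2 (by omega) (by omega) (by omega)]
        have e2 : (PySem.List.pyRange 1 i 1).map
            (fun k => pvGet2 dp k j + pvGet2 dp (i - k) j) =
            (PySem.List.pyRange 1 i 1).map
            (fun k => fSpec price k j + fSpec price (i - k) j) := by
          apply List.map_congr_left
          intro k hk
          have hk' := PySem.List.mem_pyRange_one.mp hk
          rw [hget k j (by omega) (by omega) hj (by omega) (by omega),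
            hget (i - k) j (by omega) (by omega) hj (by omega) (by omega)]
        rw [e1, e2]
        apply cell_shape
        · intro x hx
          simp only [List.mem_map] at hx
          obtain ⟨k, _, rfl⟩ := hx
          have := fSpec_nonneg price i k; have := fSpec_nonneg price i (j - k); omega
        · intro x hx
          simp only [List.mem_map] at hx
          obtain ⟨k, _, rfl⟩ := hx
          have := fSpec_nonneg price k j; have := fSpec_nonneg price (i - k) j; omega
      -- setting the cell keeps the invariant, advanced by one column
      have hG' : GridOK price m n i (j + 1) (pvSet2 dp i j (pvCell price dp i j)) := by
        rw [pvSet2_eq dp i j _ hi hj]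
        refine ⟨by rw [List.length_set]; exact hlen, ?_, ?_⟩
        · intro row hrow'
          rcases List.mem_or_eq_of_mem_set hrow' with h | h
          · exact hrows row h
          · subst h; rw [List.length_set]; exact hrowlen
        · intro a b ha ha2 hb hb2 hc
          rw [← pvSet2_eq dp i j _ hi hj,
            pvGet2_set dp i j _ a b hi hitn hj (by omega) ha hb]
          by_cases hij : a.toNat = i.toNat ∧ b.toNat = j.toNat
          · rw [if_pos hij]
            have hai : a = i := by omega
            have hbj : b = j := by omega
            rw [hai, hbj]; exact hcell
          · rw [if_neg hij]
            exact hget a b ha ha2 hb hb2 (by omega)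
      exact ih (j + 1) _ (by omega) (by omega) hG'
    · rw [PySem.List.pyRange_one_eq_nil (show 1 + n ≤ j by omega)]
      exact ⟨hG.1, hG.2.1, fun a b ha ha2 hb hb2 hc =>
        hG.2.2 a b ha ha2 hb hb2 (by omega)⟩

lemma outer_ok (price : PySem.Dict (Int × Int) Int) (m n : Int) (hn : 0 ≤ n) :
    ∀ K (i : Int) (dp : List (List Int)), ((1 + m) - i).toNat ≤ K → 0 ≤ i →
      GridOK price m n i 0 dp →
      GridOK price m n (1 + m) 0
        ((PySem.List.pyRange i (1 + m) 1).foldl (fun dp i' =>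
          (PySem.List.pyRange 0 (1 + n) 1).foldl
            (fun dp j => pvSet2 dp i' j (pvCell price dp i' j)) dp) dp) := by
  intro K
  induction K with
  | zero =>
    intro i dp hK hi hG
    rw [PySem.List.pyRange_one_eq_nil (show 1 + m ≤ i by omega)]
    exact ⟨hG.1, hG.2.1, fun a b ha ha2 hb hb2 hc =>
      hG.2.2 a b ha ha2 hb hb2 (by omega)⟩
  | succ K ih =>
    intro i dp hK hi hG
    by_cases him : i < 1 + m
    · rw [PySem.List.pyRange_one_cons him, List.foldl_cons]
      have hrow := inner_ok price m n i hi (by omega) hn (1 + n).toNat 0 dp (by omega)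
        le_rfl (⟨hG.1, hG.2.1, fun a b ha ha2 hb hb2 hc =>
          hG.2.2 a b ha ha2 hb hb2 (by omega)⟩)
      exact ih (i + 1) _ (by omega) (by omega)
        ⟨hrow.1, hrow.2.1, fun a b ha ha2 hb hb2 hc =>
          hrow.2.2 a b ha ha2 hb hb2 (by omega)⟩
    · rw [PySem.List.pyRange_one_eq_nil (show 1 + m ≤ i by omega)]
      exact ⟨hG.1, hG.2.1, fun a b ha ha2 hb hb2 hc =>
        hG.2.2 a b ha ha2 hb hb2 (by omega)⟩

lemma dp0_ok (price : PySem.Dict (Int × Int) Int) (m n : Int) :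
    GridOK price m n 0 0
      ((PySem.List.pyRange 0 (m + 1) 1).foldl
        (fun dp _ => dp ++ [PySem.List.pyRepeat [(0 : Int)] (n + 1)]) []) := by
  rw [PySem.List.foldl_append_singleton_eq_map]
  refine ⟨?_, ?_, ?_⟩
  · simp [PySem.List.length_pyRange_one]
  · intro row hrow
    simp only [List.nil_append, List.mem_map] at hrow
    obtain ⟨_, _, rfl⟩ := hrow
    rw [PySem.List.pyRepeat_singleton, List.length_replicate]
  · intro a b ha ha2 hb hb2 hc; omega

-- ===== VERDICT (by name: the statement is the Claim_ definition above) =====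
theorem sellingWood_spec : Claim_equal_sellingWood := by
  intro m n prices _ hPre
  obtain ⟨hm, hn, _⟩ := hPre
  unfold Spec_sellingWood
  rw [alt_eq, sellingWood]
  have hG := outer_ok (pvBuildPrice prices) m n hn (1 + m).toNat 0 _ (by omega) le_rfl
    (dp0_ok (pvBuildPrice prices) m n)
  exact hG.2.2 m n hm le_rfl hn le_rfl (by omega)
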